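-- pv_equiv track=rewrite | github.com/brucea-school/Data-Structures-S1 | general data structures/big O stuff/odd stuff.py | gimme_da_odds
-- ===== SOURCE A (Python) =====
-- def gimme_da_odds(numbers: list) -> bool:
--     if numbers[0]%2==1:
--         for i in numbers[1:]:
--             if not i%2==1:
--                 return True
--     else:
--         for i in numbers[1:]:
--             if i%2==1:
--                 return True
--     return False
-- ===== SOURCE B (Python) =====
-- def gimme_da_odds(numbers: list) -> bool:
--     return len({n % 2 for n in numbers}) > 1
-- ===== Notes on version B (the rewrite author's own statement) =====
-- stated objective: simpler
-- what changed: Replaces the two mirror-image early-exit loops branching on the first element's parity by one scan that collects the distinct parities n % 2 into a set and returns whether more than one parity occurs.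
-- crash fix: On the empty list A raises IndexError (numbers[0]); B returns False (no mixed parities). — e.g. on gimme_da_odds([]): A raises IndexError, B returns false
import Mathlib
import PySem

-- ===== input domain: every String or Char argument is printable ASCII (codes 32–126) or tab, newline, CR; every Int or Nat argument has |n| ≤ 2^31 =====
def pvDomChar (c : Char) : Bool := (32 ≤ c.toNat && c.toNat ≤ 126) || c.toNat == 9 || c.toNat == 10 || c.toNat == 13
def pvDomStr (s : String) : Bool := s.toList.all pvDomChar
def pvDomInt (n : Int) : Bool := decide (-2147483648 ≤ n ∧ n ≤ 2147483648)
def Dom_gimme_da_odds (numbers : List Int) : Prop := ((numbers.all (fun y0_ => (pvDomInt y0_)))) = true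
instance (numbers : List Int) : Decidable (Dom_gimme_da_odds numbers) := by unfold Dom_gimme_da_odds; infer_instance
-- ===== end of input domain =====

-- B replaces A's two mirror-image early-exit loops by one scan collecting distinct parities into a set (objective: simpler).

-- ===== PORT A =====
-- A: branch on numbers[0] % 2 == 1, then an early-exit loop over numbers[1:] (ported as List.any);
-- on [] Python raises IndexError (excluded by Pre_), the port returns false there.
def gimme_da_odds (numbers : List Int) : Bool :=
  match numbers with
  | [] => false
  | h :: t =>
    if PySem.Int.mod h 2 == 1 then
      t.any (fun i => !(PySem.Int.mod i 2 == 1))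
    else
      t.any (fun i => PySem.Int.mod i 2 == 1)

-- ===== PORT B =====
-- B: len({n % 2 for n in numbers}) > 1
def gimme_da_odds_alt (numbers : List Int) : Bool :=
  decide (PySem.Set.len (PySem.Set.ofList (numbers.map (fun n => PySem.Int.mod n 2))) > 1)

-- ===== PRECONDITION & SPEC =====
-- Pre_ excludes the empty list, on which A raises IndexError (numbers[0]).
def Pre_gimme_da_odds (numbers : List Int) : Prop := numbers ≠ []
instance (numbers : List Int) : Decidable (Pre_gimme_da_odds numbers) := by unfold Pre_gimme_da_odds; infer_instance
def pvWitness_gimme_da_odds : List Int := [3, 4]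

-- On the empty list A raises IndexError (numbers[0]); B returns False (no mixed parities).
def Raises_gimme_da_odds (numbers : List Int) : Prop := numbers = []
instance (numbers : List Int) : Decidable (Raises_gimme_da_odds numbers) := by unfold Raises_gimme_da_odds; infer_instance
def pvRaiseWitness_gimme_da_odds : List Int := []
def pvRaiseWitnessOut_gimme_da_odds : Bool := false

def Spec_gimme_da_odds (numbers : List Int) (out : Bool) : Prop := out = gimme_da_odds_alt numbers
instance (numbers : List Int) (out : Bool) : Decidable (Spec_gimme_da_odds numbers out) := by unfold Spec_gimme_da_odds; infer_instance

-- ===== CLAIM (what is proved, stated in full; the proofs are below) =====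
def Claim_equal_gimme_da_odds : Prop := ∀ (numbers : List Int), Dom_gimme_da_odds numbers → Pre_gimme_da_odds numbers → Spec_gimme_da_odds numbers (gimme_da_odds numbers)
def Claim_raises_gimme_da_odds : Prop := (∀ (numbers : List Int), Dom_gimme_da_odds numbers → Raises_gimme_da_odds numbers → ¬ Pre_gimme_da_odds numbers) ∧ (Dom_gimme_da_odds (pvRaiseWitness_gimme_da_odds) ∧ Raises_gimme_da_odds (pvRaiseWitness_gimme_da_odds) ∧ gimme_da_odds_alt (pvRaiseWitness_gimme_da_odds) = pvRaiseWitnessOut_gimme_da_odds)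

-- ===== LEMMAS AND PROOFS =====

lemma pv_pm (n : Int) : PySem.Int.mod n 2 = n % 2 :=
  PySem.Int.mod_eq_emod_of_pos (by norm_num)

-- once both parities are present, adding further parities changes nothing
lemma pv_sat (b : Int) (hb : b = 0 ∨ b = 1) (t : List Int) :
    List.foldl PySem.Set.add [b, 1 - b] (t.map (fun n => n % 2)) = [b, 1 - b] := by
  induction t with
  | nil => rfl
  | cons x t ih =>
    have hx : x % 2 = 0 ∨ x % 2 = 1 := by omega
    simp only [List.map_cons, List.foldl_cons]
    have : PySem.Set.add [b, 1 - b] (x % 2) = [b, 1 - b] := by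
      unfold PySem.Set.add
      rcases hb with rfl | rfl <;> rcases hx with h | h <;>
        rw [h] <;> simp [PySem.Set.contains]
    rw [this, ih]

-- the accumulated parity set is [b, 1-b] iff some element has parity ≠ b, else [b]
lemma pv_fold (b : Int) (hb : b = 0 ∨ b = 1) (t : List Int) :
    List.foldl PySem.Set.add [b] (t.map (fun n => n % 2)) =
      (if t.any (fun i => !(i % 2 == b)) then [b, 1 - b] else [b]) := by
  induction t with
  | nil => rfl
  | cons x t ih =>
    have hx : x % 2 = 0 ∨ x % 2 = 1 := by omega
    simp only [List.map_cons, List.foldl_cons, List.any_cons]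
    by_cases hxb : x % 2 = b
    · have hadd : PySem.Set.add [b] (x % 2) = [b] := by
        unfold PySem.Set.add; rw [hxb]; simp [PySem.Set.contains]
      rw [hadd, ih]
      have : (x % 2 == b) = true := by simp [hxb]
      simp [this]
    · have hx' : x % 2 = 1 - b := by rcases hb with rfl | rfl <;> omega
      have hadd : PySem.Set.add [b] (x % 2) = [b, 1 - b] := by
        unfold PySem.Set.add; rw [hx']
        rcases hb with rfl | rfl <;> simp [PySem.Set.contains]
      rw [hadd, pv_sat b hb t]
      have : (x % 2 == b) = false := by simp [hxb]
      simp [this]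

-- ===== VERDICT (by name: the statement is the Claim_ definition above) =====
theorem gimme_da_odds_spec : Claim_equal_gimme_da_odds := by
  intro numbers _ hpre
  unfold Spec_gimme_da_odds
  match numbers with
  | [] => exact absurd rfl hpre
  | h :: t =>
    unfold gimme_da_odds gimme_da_odds_alt
    simp only [pv_pm]
    have hb : h % 2 = 0 ∨ h % 2 = 1 := by omega
    have hof : PySem.Set.ofList ((h :: t).map (fun n => n % 2)) =
        List.foldl PySem.Set.add [h % 2] (t.map (fun n => n % 2)) := by
      rw [PySem.Set.ofList_eq_foldl]
      simp [PySem.Set.add, PySem.Set.contains]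
    rw [hof, pv_fold _ hb t]
    rcases hb with h0 | h1
    · have hne : (h % 2 == 1) = false := by simp [h0]
      have hfun : (fun i : Int => (i % 2 == 1)) = fun i : Int => !(i % 2 == (0:Int)) := by
        funext i
        have : i % 2 = 0 ∨ i % 2 = 1 := by omega
        rcases this with h | h <;> simp [h]
      rw [hne, h0]
      simp only [hfun]
      cases hany : t.any (fun i => !(i % 2 == (0:Int))) <;> simp [PySem.Set.len]
    · have heq : (h % 2 == 1) = true := by simp [h1]
      rw [heq, h1]
      cases hany : t.any (fun i => !(i % 2 == (1:Int))) <;> simp [PySem.Set.len]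

@[simp] theorem gimme_da_odds_raises : Claim_raises_gimme_da_odds := by
  unfold Claim_raises_gimme_da_odds
  refine ⟨fun numbers _ hr => ?_, by decide⟩
  simp only [Raises_gimme_da_odds] at hr
  simp [hr, Pre_gimme_da_odds]
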